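-- pv_equiv track=rewrite | github.com/Ereshkigal-h/school_code | school_code/NEFUUoA-Software Fundamentals-2024 AutumnLab Test Revision/2.py | get_sum_of_neighbours
-- ===== SOURCE A (Python) =====
-- def get_sum_of_neighbours(a_list):
--     new_list=[]
--     for i in range(len(a_list)):
--         if i == 0:
--             new_list+=[a_list[i+1]]
--         elif i==len(a_list) -1:
--             new_list+=[a_list[i-1]]
--         else:
--             new_list+=[a_list[i-1]+a_list[i+1]]
--     return new_list
-- ===== SOURCE B (Python) =====
-- def get_sum_of_neighbours(a_list):
--     if not a_list:
--         return []
--     interior = [p + q for p, q in zip(a_list, a_list[2:])]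
--     return [a_list[1]] + interior + [a_list[-2]]
-- ===== Notes on version B (the rewrite author's own statement) =====
-- stated objective: simpler
-- what changed: Replaces the index loop with per-iteration branching by an endpoint/interior decomposition: the interior is a branch-free zip of the list with itself shifted by two, bracketed by the two endpoint values.
import Mathlib
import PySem

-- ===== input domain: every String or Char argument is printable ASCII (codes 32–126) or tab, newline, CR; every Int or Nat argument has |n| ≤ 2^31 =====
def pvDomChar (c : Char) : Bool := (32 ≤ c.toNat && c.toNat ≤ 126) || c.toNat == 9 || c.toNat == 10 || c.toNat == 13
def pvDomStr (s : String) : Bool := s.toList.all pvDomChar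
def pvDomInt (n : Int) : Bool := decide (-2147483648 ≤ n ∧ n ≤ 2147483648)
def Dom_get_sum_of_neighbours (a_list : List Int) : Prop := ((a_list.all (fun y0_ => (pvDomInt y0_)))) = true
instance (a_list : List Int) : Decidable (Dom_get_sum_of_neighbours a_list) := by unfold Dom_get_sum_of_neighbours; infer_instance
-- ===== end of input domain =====

-- B replaces A's index loop with per-iteration branching by an endpoint/interior
-- decomposition (zip of the list with its 2-shift, bracketed by the two endpoint values); same O(n) cost.


-- ===== PORT A =====
-- literal port of A's index loop; under Pre_ every index it uses is in range, so pyGetD's default 0 is never produced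
def get_sum_of_neighbours (a_list : List Int) : List Int :=
  (PySem.List.pyRange 0 a_list.length 1).foldl (fun new_list i =>
    if i == 0 then
      new_list ++ [PySem.List.pyGetD a_list (i + 1) 0]
    else if i == (a_list.length : Int) - 1 then
      new_list ++ [PySem.List.pyGetD a_list (i - 1) 0]
    else
      new_list ++ [PySem.List.pyGetD a_list (i - 1) 0 + PySem.List.pyGetD a_list (i + 1) 0]) []

-- ===== PORT B =====
def get_sum_of_neighbours_alt (a_list : List Int) : List Int :=
  match a_list with
  | [] => []
  | _ :: _ =>
    let interior := (a_list.zip (PySem.List.slice a_list (some 2) none)).map (fun pq => pq.1 + pq.2)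
    [PySem.List.pyGetD a_list 1 0] ++ interior ++ [PySem.List.pyGetD a_list (-2) 0]

-- ===== PRECONDITION & SPEC =====
-- Pre_ excludes exactly the one-element lists, on which the Python A raises IndexError (a_list[1]); B raises there too.
def Pre_get_sum_of_neighbours (a_list : List Int) : Prop := a_list.length ≠ 1
instance (a_list : List Int) : Decidable (Pre_get_sum_of_neighbours a_list) := by unfold Pre_get_sum_of_neighbours; infer_instance
def pvWitness_get_sum_of_neighbours : List Int := [3, -1, 4, 1]

def Spec_get_sum_of_neighbours (a_list : List Int) (out : List Int) : Prop := out = get_sum_of_neighbours_alt a_list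
instance (a_list : List Int) (out : List Int) : Decidable (Spec_get_sum_of_neighbours a_list out) := by unfold Spec_get_sum_of_neighbours; infer_instance

-- ===== CLAIM (what is proved, stated in full; the proofs are below) =====
def Claim_equal_get_sum_of_neighbours : Prop := ∀ (a_list : List Int), Dom_get_sum_of_neighbours a_list → Pre_get_sum_of_neighbours a_list → Spec_get_sum_of_neighbours a_list (get_sum_of_neighbours a_list)

-- ===== LEMMAS AND PROOFS =====

theorem pv_getD_neg_two (xs : List Int) (h : 2 ≤ xs.length) :
    PySem.List.pyGetD xs (-2) 0 = xs.getD (xs.length - 2) 0 := by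
  have h2 : (0:Int) ≤ -2 + xs.length := by omega
  have h3 : (-2 + (xs.length:Int)).toNat = xs.length - 2 := by omega
  simp [PySem.List.pyGetD, PySem.List.pyGet?, PySem.List.pyIdx?, h]

theorem pv_A_map (xs : List Int) :
    get_sum_of_neighbours xs = (List.range xs.length).map (fun (k : Nat) =>
      if (k : Int) = 0 then PySem.List.pyGetD xs ((k : Int) + 1) 0
      else if (k : Int) = (xs.length : Int) - 1 then PySem.List.pyGetD xs ((k : Int) - 1) 0
      else PySem.List.pyGetD xs ((k : Int) - 1) 0 + PySem.List.pyGetD xs ((k : Int) + 1) 0) := by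
  unfold get_sum_of_neighbours
  have hf : (fun (new_list : List Int) (i : Int) =>
      if i == 0 then new_list ++ [PySem.List.pyGetD xs (i + 1) 0]
      else if i == (xs.length : Int) - 1 then new_list ++ [PySem.List.pyGetD xs (i - 1) 0]
      else new_list ++ [PySem.List.pyGetD xs (i - 1) 0 + PySem.List.pyGetD xs (i + 1) 0])
      = fun new_list i => new_list ++ [if i = 0 then PySem.List.pyGetD xs (i + 1) 0
          else if i = (xs.length : Int) - 1 then PySem.List.pyGetD xs (i - 1) 0
          else PySem.List.pyGetD xs (i - 1) 0 + PySem.List.pyGetD xs (i + 1) 0] := by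
    funext acc i
    simp only [beq_iff_eq]
    split_ifs <;> rfl
  rw [hf, PySem.List.foldl_append_singleton_eq_map, PySem.List.pyRange_one, List.map_map]
  simp only [List.nil_append, Int.sub_zero, Int.toNat_natCast]
  refine List.map_congr_left fun k _ => ?_
  simp

theorem pv_main (xs : List Int) (h : xs.length ≠ 1) :
    get_sum_of_neighbours xs = get_sum_of_neighbours_alt xs := by
  match xs, h with
  | [], _ => rfl
  | [x], h => exact absurd rfl h
  | a :: b :: t, _ =>
    rw [pv_A_map]
    have hdrop : PySem.List.slice (a :: b :: t) (some 2) none = t := by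
      have h2 := PySem.List.slice_from (a :: b :: t) (a := 2) (by norm_num)
      simpa using h2
    simp only [get_sum_of_neighbours_alt, hdrop]
    apply List.ext_getElem
    · simp; omega
    · intro i hi1 hi2
      simp only [List.length_map, List.length_range] at hi1
      have hlen : (a :: b :: t).length = t.length + 2 := by simp
      rw [List.getElem_map, List.getElem_range]
      by_cases h0 : i = 0
      · subst h0
        norm_num
      · by_cases hl : i = t.length + 1
        · subst hl
          have hc0 : ((t.length + 1 : Nat) : Int) ≠ 0 := by push_cast; omega
          have hc1 : ((t.length + 1 : Nat) : Int) = ((a :: b :: t).length : Int) - 1 := by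
            push_cast [hlen]; omega
          rw [if_neg (by exact_mod_cast hc0), if_pos hc1,
              List.getElem_append_right (by simp)]
          have hi : ((t.length + 1 : Nat) : Int) - 1 = (t.length : Int) := by push_cast; ring
          rw [hi, PySem.List.pyGetD_natCast]
          simp [pv_getD_neg_two _ (by simp : 2 ≤ (a :: b :: t).length)]
        · obtain ⟨j, rfl⟩ : ∃ j, i = j + 1 := ⟨i - 1, by omega⟩
          have hj : j < t.length := by
            have := hi1; rw [hlen] at this; omega
          have hc0 : ((j + 1 : Nat) : Int) ≠ 0 := by push_cast; omega
          have hc1 : ((j + 1 : Nat) : Int) ≠ ((a :: b :: t).length : Int) - 1 := by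
            rw [hlen]; push_cast; omega
          rw [if_neg hc0, if_neg hc1]
          have e1 : ((j + 1 : Nat) : Int) - 1 = ((j : Nat) : Int) := by push_cast; ring
          have e2 : ((j + 1 : Nat) : Int) + 1 = ((j + 2 : Nat) : Int) := by push_cast; ring
          rw [e1, e2, PySem.List.pyGetD_natCast, PySem.List.pyGetD_natCast,
              List.getElem_append_left (by simp; omega), List.getElem_append_right (by simp),
              List.getElem_map, List.getElem_zip]
          have g1 : (a :: b :: t).getD j 0 = (a :: b :: t)[j]'(by simp; omega) :=
            List.getD_eq_getElem _ _ (by simp; omega)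
          have g2 : (a :: b :: t).getD (j + 2) 0 = t[j]'hj := by
            rw [List.getD_eq_getElem _ _ (by simp; omega)]; simp
          rw [g1, g2]
          simp

-- ===== VERDICT (by name: the statement is the Claim_ definition above) =====
theorem get_sum_of_neighbours_spec : Claim_equal_get_sum_of_neighbours := by
  intro xs _ hpre
  exact pv_main xs hpre
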